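-- pv_equiv track=rewrite | github.com/exeD1n/TA | syntax.py | process_main_block
-- ===== SOURCE A (Python) =====
-- def process_main_block(lines):
--     """Обрабатывает основной блок между begin и end, добавляя ; при необходимости."""
--     main_constructions = []
--
--     # Определяем список главных конструкций
--     for line in lines:
--         line = line.strip().lower()
--         if line in ['do while', 'if', 'for']:
--             main_constructions.append(line)
--
--     # Если конструкций больше одной, добавляем ; в конце каждой (кроме последней)
--     if len(main_constructions) > 1:
--         for i in range(len(lines)):
--             line = lines[i].strip().lower()
--             # Добавляем ; в конец каждой главной конструкции, если она не последняя
--             if line in ['do while', 'if', 'for'] and i < len(lines) - 1: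
--                 if not lines[i].endswith(';'):
--                     lines[i] = lines[i] + " ;"
--
--     return lines
-- ===== SOURCE B (Python) =====
-- def process_main_block(lines):
--     """Single fused pass: build the speculatively patched list and the construction count
--     together, then commit it (slice assignment, in place like A) only if count > 1."""
--     KW = ('do while', 'if', 'for')
--     n = len(lines)
--     c = 0
--     new = []
--     for i, h in enumerate(lines):
--         if h.strip().lower() in KW:
--             c += 1
--             if i < n - 1 and not h.endswith(';'):
--                 h = h + " ;"
--         new.append(h)
--     if c > 1:
--         lines[:] = new
--     return lines
-- ===== Notes on version B (the rewrite author's own statement) =====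
-- stated objective: alternative
-- what changed: B replaces A's two staged passes (first collect the normalized construction strings, then re-scan all lines by index and patch the list in place) by one fused forward pass with an accumulator that counts construction lines while speculatively building the whole patched list, committing it atomically only when the count exceeds one.
import Mathlib
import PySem

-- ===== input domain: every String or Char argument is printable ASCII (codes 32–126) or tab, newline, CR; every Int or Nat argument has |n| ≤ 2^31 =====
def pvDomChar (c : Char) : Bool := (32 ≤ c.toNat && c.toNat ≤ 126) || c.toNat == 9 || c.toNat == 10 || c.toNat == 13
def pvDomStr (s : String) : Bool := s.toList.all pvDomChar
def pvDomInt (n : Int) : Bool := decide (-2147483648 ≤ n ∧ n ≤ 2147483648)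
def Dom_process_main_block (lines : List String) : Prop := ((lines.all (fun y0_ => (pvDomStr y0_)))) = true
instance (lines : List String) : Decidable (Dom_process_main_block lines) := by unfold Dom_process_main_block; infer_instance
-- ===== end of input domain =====

-- B replaces A's two staged passes (collect construction strings, then an index loop patching
-- in place) by one fused forward pass that counts construction lines while speculatively
-- building the patched list, committing it only when the count exceeds one; A mutates `lines`
-- entry by entry, B writes back via slice assignment — the theorems are about the return value.

-- ===== PORT A =====
def process_main_block (lines : List String) : List String :=
  let main_constructions := lines.foldl (fun acc line =>
      if PySem.Str.lower (PySem.Str.strip line) ∈ (["do while", "if", "for"] : List String)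
      then acc ++ [PySem.Str.lower (PySem.Str.strip line)] else acc) ([] : List String)
  if main_constructions.length > 1 then
    (PySem.List.pyRange 0 lines.length 1).foldl (fun ls i =>
      if PySem.Str.lower (PySem.Str.strip (PySem.List.pyGetD ls i "")) ∈ (["do while", "if", "for"] : List String) ∧ i < (ls.length : Int) - 1 then
        if ¬ (PySem.Str.endswith (PySem.List.pyGetD ls i "") ";" = true) then
          PySem.List.pySetD ls i (PySem.List.pyGetD ls i "" ++ " ;")
        else ls
      else ls) lines
  else lines

-- ===== PORT B =====
-- `h.strip().lower() in KW` of Source B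
def pvCb (line : String) : Bool :=
  decide (PySem.Str.lower (PySem.Str.strip line) ∈ (["do while", "if", "for"] : List String))

def process_main_block_alt (lines : List String) : List String :=
  let n := lines.length
  -- Source B's single `for i, h in enumerate(lines)` loop: state = (count, speculative new list)
  let r := (PySem.List.enumerate lines).foldl (fun (st : Nat × List String) p =>
      if pvCb p.2 then
        (st.1 + 1,
         st.2 ++ [if p.1 < (n : Int) - 1 ∧ ¬ (PySem.Str.endswith p.2 ";" = true)
                  then p.2 ++ " ;" else p.2])
      else (st.1, st.2 ++ [p.2])) ((0 : Nat), ([] : List String))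
  if r.1 > 1 then r.2 else lines

-- ===== PRECONDITION & SPEC =====
def Spec_process_main_block (lines : List String) (out : List String) : Prop := out = process_main_block_alt lines
instance (lines : List String) (out : List String) : Decidable (Spec_process_main_block lines out) := by unfold Spec_process_main_block; infer_instance

-- ===== CLAIM (what is proved, stated in full; the proofs are below) =====
def Claim_equal_process_main_block : Prop := ∀ (lines : List String), Dom_process_main_block lines → Spec_process_main_block lines (process_main_block lines)

-- ===== LEMMAS AND PROOFS =====

def pvStepA (ls : List String) (i : Int) : List String :=
  if PySem.Str.lower (PySem.Str.strip (PySem.List.pyGetD ls i "")) ∈ (["do while", "if", "for"] : List String) ∧ i < (ls.length : Int) - 1 then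
    if ¬ (PySem.Str.endswith (PySem.List.pyGetD ls i "") ";" = true) then
      PySem.List.pySetD ls i (PySem.List.pyGetD ls i "" ++ " ;")
    else ls
  else ls

def pvStepB (n : Nat) (st : Nat × List String) (p : Int × String) : Nat × List String :=
  if pvCb p.2 then
    (st.1 + 1,
     st.2 ++ [if p.1 < (n : Int) - 1 ∧ ¬ (PySem.Str.endswith p.2 ";" = true)
              then p.2 ++ " ;" else p.2])
  else (st.1, st.2 ++ [p.2])

-- what B produces at one position
def pvPatch (n : Nat) (i : Int) (h : String) : String :=
  if pvCb h then
    (if i < (n : Int) - 1 ∧ ¬ (PySem.Str.endswith h ";" = true) then h ++ " ;" else h)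
  else h

def pvMapFrom (n : Nat) : List String → Int → List String
  | [], _ => []
  | h :: t, s => pvPatch n s h :: pvMapFrom n t (s + 1)

lemma pv_mcs_length (lines : List String) :
    (lines.foldl (fun acc line =>
      if PySem.Str.lower (PySem.Str.strip line) ∈ (["do while", "if", "for"] : List String)
      then acc ++ [PySem.Str.lower (PySem.Str.strip line)] else acc) ([] : List String)).length
    = (lines.filter pvCb).length := by
  rw [PySem.List.foldl_append_ite
        (p := fun line => PySem.Str.lower (PySem.Str.strip line) ∈ (["do while", "if", "for"] : List String))
        (f := fun line => PySem.Str.lower (PySem.Str.strip line))]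
  simp only [List.nil_append, List.length_map]
  rfl

-- B's fold, characterized: it accumulates the construction count and the patched list
lemma pvB_fold (n : Nat) :
    ∀ (xs : List String) (s : Int) (c : Nat) (new : List String),
    (PySem.List.enumerate xs s).foldl (pvStepB n) (c, new)
      = (c + (xs.filter pvCb).length, new ++ pvMapFrom n xs s) := by
  intro xs
  induction xs with
  | nil => intro s c new; simp [PySem.List.enumerate, pvMapFrom]
  | cons h t ih =>
    intro s c new
    rw [PySem.List.enumerate_cons, List.foldl_cons, pvMapFrom]
    by_cases hc : pvCb h = true
    · rw [show pvStepB n (c, new) (s, h)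
            = (c + 1, new ++ [pvPatch n s h]) by simp [pvStepB, pvPatch, hc]]
      rw [ih (s + 1) (c + 1) (new ++ [pvPatch n s h])]
      simp [hc]
      omega
    · rw [show pvStepB n (c, new) (s, h)
            = (c, new ++ [pvPatch n s h]) by simp [pvStepB, pvPatch, hc]]
      rw [ih (s + 1) c (new ++ [pvPatch n s h])]
      simp [hc]

-- A's patch loop, characterized: folding A's step over range [k, n) turns the tail into
-- B's patched tail, provided the state still agrees with the original there
lemma pv_main (lines : List String) :
    ∀ (m k : Nat) (ls : List String), m = lines.length - k → ls.length = lines.length →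
    (∀ j, k ≤ j → ls[j]? = lines[j]?) →
    (PySem.List.pyRange k lines.length 1).foldl pvStepA ls
    = ls.take k ++ pvMapFrom lines.length (lines.drop k) k := by
  intro m
  induction m with
  | zero =>
    intro k ls hm hlen _
    have hk : lines.length ≤ k := by omega
    rw [PySem.List.pyRange_one_eq_nil (by exact_mod_cast hk), List.drop_of_length_le hk]
    rw [List.foldl_nil, List.take_of_length_le (by omega)]
    simp [pvMapFrom]
  | succ m ih =>
    intro k ls hm hlen hagree
    by_cases hk : k < lines.length
    · rw [PySem.List.pyRange_one_cons (by exact_mod_cast hk), List.foldl_cons]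
      have hget : PySem.List.pyGetD ls (k : Int) "" = lines[k] := by
        have := hagree k le_rfl
        simp only [PySem.List.pyGetD_natCast]
        rw [List.getD_eq_getElem?_getD, this]
        simp [hk]
      have hlsk : ls[k]? = some lines[k] := by
        rw [hagree k le_rfl]; exact List.getElem?_eq_getElem hk
      have hdrop : lines.drop k = lines[k] :: lines.drop (k + 1) := List.drop_eq_getElem_cons hk
      set ls' : List String := pvStepA ls (k : Int) with hls'
      have hstep : ls' = if pvCb lines[k] = true ∧ ¬ (PySem.Str.endswith lines[k] ";" = true)
            ∧ (k : Int) < (lines.length : Int) - 1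
          then PySem.List.pySetD ls (k : Int) (lines[k] ++ " ;") else ls := by
        rw [hls']; unfold pvStepA
        rw [hget, hlen]
        by_cases hc : pvCb lines[k] = true
        · have hc' : PySem.Str.lower (PySem.Str.strip lines[k]) ∈ (["do while", "if", "for"] : List String) := by
            simpa [pvCb] using hc
          by_cases hlt : (k : Int) < (lines.length : Int) - 1
          · simp [hc, hc', hlt]
          · simp [hc, hc', hlt]
        · have hc' : ¬ PySem.Str.lower (PySem.Str.strip lines[k]) ∈ (["do while", "if", "for"] : List String) := by
            simpa [pvCb] using hc
          simp [hc, hc']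
      have hset : PySem.List.pySetD ls (k : Int) (lines[k] ++ " ;") = ls.set k (lines[k] ++ " ;") := by
        simp [PySem.List.pySetD_natCast]
      have hlen' : ls'.length = lines.length := by
        rw [hstep]; split <;> simp [hset, hlen]
      have hagree' : ∀ j, k + 1 ≤ j → ls'[j]? = lines[j]? := by
        intro j hj
        rw [hstep]; split
        · rw [hset, List.getElem?_set_ne (by omega)]
          exact hagree j (by omega)
        · exact hagree j (by omega)
      have hih := ih (k + 1) ls' (by omega) hlen' hagree'
      have hcast : PySem.List.pyRange ((k : Int) + 1) (lines.length : Int) 1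
          = PySem.List.pyRange ((k + 1 : Nat) : Int) (lines.length : Int) 1 := by
        push_cast; ring_nf
      have htake0 : ls'.take k = ls.take k := by
        rw [hstep]; split
        · rw [hset, List.take_set_of_le (le_refl k)]
        · rfl
      have hgetk' : ls'[k]? = some (pvPatch lines.length (k : Int) lines[k]) := by
        rw [hstep]; unfold pvPatch
        by_cases hc : pvCb lines[k] = true
        · by_cases hcond : (k : Int) < (lines.length : Int) - 1 ∧ ¬ (PySem.Str.endswith lines[k] ";" = true)
          · rw [if_pos ⟨hc, hcond.2, hcond.1⟩, if_pos hc, if_pos hcond, hset,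
              List.getElem?_set_self (by omega)]
          · have h1 : ¬ (pvCb lines[k] = true ∧ ¬ (PySem.Str.endswith lines[k] ";" = true)
                ∧ (k : Int) < (lines.length : Int) - 1) := by
              intro h; exact hcond ⟨h.2.2, h.2.1⟩
            rw [if_neg h1, if_pos hc, if_neg hcond]
            exact hlsk
        · rw [if_neg (fun h => hc h.1), if_neg hc]
          exact hlsk
      have htake : ls'.take (k + 1) = ls.take k ++ [pvPatch lines.length (k : Int) lines[k]] := by
        rw [List.take_add_one, htake0, hgetk']
        rfl
      rw [hcast, hih, htake, hdrop]
      rw [show pvMapFrom lines.length (lines[k] :: lines.drop (k + 1)) (k : Int)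
            = pvPatch lines.length (k : Int) lines[k] :: pvMapFrom lines.length (lines.drop (k + 1)) ((k : Int) + 1)
          from rfl]
      push_cast
      simp
    · omega

-- ===== VERDICT (by name: the statement is the Claim_ definition above) =====
theorem process_main_block_spec : Claim_equal_process_main_block := by
  intro lines _
  show process_main_block lines = process_main_block_alt lines
  have hA : process_main_block lines =
      if (lines.foldl (fun acc line =>
          if PySem.Str.lower (PySem.Str.strip line) ∈ (["do while", "if", "for"] : List String)
          then acc ++ [PySem.Str.lower (PySem.Str.strip line)] else acc) ([] : List String)).length > 1
      then (PySem.List.pyRange 0 lines.length 1).foldl pvStepA lines else lines := rfl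
  have hB : process_main_block_alt lines =
      if ((PySem.List.enumerate lines).foldl (pvStepB lines.length) ((0 : Nat), ([] : List String))).1 > 1
      then ((PySem.List.enumerate lines).foldl (pvStepB lines.length) ((0 : Nat), ([] : List String))).2
      else lines := rfl
  rw [hA, hB, pv_mcs_length, pvB_fold lines.length lines 0 0 []]
  simp only [Nat.zero_add, List.nil_append]
  split
  · have h := pv_main lines lines.length 0 lines (by omega) rfl (fun _ _ => rfl)
    simpa using h
  · rfl
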